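-- pv_equiv track=rewrite | github.com/halogen28372/Tokenizer_Focus | arc_lago_tokenizer.py | is_thin_path
-- ===== SOURCE A (Python) =====
-- from typing import List, Tuple, Dict, Optional, Set
--
-- Point = Tuple[int, int]  # (row, col)
--
-- N8 = [(-1,0),(-1,1),(0,1),(1,1),(1,0),(1,-1),(0,-1),(-1,-1)]
--
-- def is_thin_path(points: Set[Point]) -> bool:
--     # each interior point has 2 neighbors (in 8-neigh), endpoints have 1 or 2 if closed
--     P = set(points)
--     degs = []
--     for (r,c) in points:
--         deg = sum((r+dr, c+dc) in P for (dr,dc) in N8)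
--         degs.append(deg)
--     # tolerate some endpoints/branch artifacts
--     end_like = sum(d <= 2 for d in degs)
--     branchy  = sum(d >= 4 for d in degs)
--     return branchy == 0 and end_like >= max(2, int(0.05*len(points)))
-- ===== SOURCE B (Python) =====
-- def is_thin_path(points):
--     # Edge-based degree accumulation: scan only the 4 "positive" offsets of the
--     # 8-neighbourhood and credit both endpoints of every adjacency once.
--     P = set(points)
--     deg = {p: 0 for p in P}
--     for (r, c) in P:
--         for (dr, dc) in ((-1, 0), (-1, 1), (0, 1), (1, 1)):
--             q = (r + dr, c + dc)
--             if q in P: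
--                 deg[(r, c)] += 1
--                 deg[q] += 1
--     end_like = sum(deg[p] <= 2 for p in points)
--     branchy = sum(deg[p] >= 4 for p in points)
--     return branchy == 0 and end_like >= max(2, int(0.05 * len(points)))
-- ===== Notes on version B (the rewrite author's own statement) =====
-- stated objective: alternative
-- what changed: B replaces A's per-point scan of all 8 neighbour offsets by a single edge pass over the 4 positive offsets that increments a pre-initialized degree dict for both endpoints of each adjacency, then counts end-like/branchy degrees by dict lookup.
import Mathlib
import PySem

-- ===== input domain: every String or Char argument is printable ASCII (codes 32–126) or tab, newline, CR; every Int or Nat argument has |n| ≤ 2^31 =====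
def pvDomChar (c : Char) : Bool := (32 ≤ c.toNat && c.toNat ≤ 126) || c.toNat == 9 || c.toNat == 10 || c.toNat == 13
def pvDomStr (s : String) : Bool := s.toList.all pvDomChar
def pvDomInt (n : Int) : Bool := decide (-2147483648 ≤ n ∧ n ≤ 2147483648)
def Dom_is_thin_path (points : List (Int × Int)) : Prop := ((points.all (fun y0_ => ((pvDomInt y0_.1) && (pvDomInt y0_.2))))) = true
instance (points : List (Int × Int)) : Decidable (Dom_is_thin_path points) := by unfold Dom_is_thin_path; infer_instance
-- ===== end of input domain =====

-- B replaces A's per-point scan of all 8 neighbour offsets by one edge pass over the 4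
-- "positive" offsets that credits both endpoints of each adjacency in a degree dict
-- (alternative decomposition, similar cost).

-- ===== PORT A =====
def pvN8 : List (Int × Int) := [(-1,0),(-1,1),(0,1),(1,1),(1,0),(1,-1),(0,-1),(-1,-1)]

def is_thin_path (points : List (Int × Int)) : Bool :=
  let P := PySem.Set.ofList points
  let degs := points.foldl (fun degs p =>
      degs ++ [pvN8.foldl (fun s off => s + (if P.contains (p.1 + off.1, p.2 + off.2) then (1 : Int) else 0)) 0]) []
  let end_like := degs.foldl (fun a d => a + (if d ≤ 2 then (1 : Int) else 0)) 0
  let branchy := degs.foldl (fun a d => a + (if d ≥ 4 then (1 : Int) else 0)) 0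
  -- int(0.05*len(points)) == len(points)//20 exactly for every list length below 2^53
  decide (branchy = 0) && decide (end_like ≥ max 2 ((points.length : Int) / 20))

-- ===== PORT B =====
def pvPOS4 : List (Int × Int) := [(-1,0),(-1,1),(0,1),(1,1)]

-- the inner loop of B's edge pass: credit both endpoints of each adjacency of r
def pvDegPass (P : PySem.Set (Int × Int)) (d : PySem.Dict (Int × Int) Int) (r : Int × Int) :
    PySem.Dict (Int × Int) Int :=
  pvPOS4.foldl (fun d off =>
    let q := (r.1 + off.1, r.2 + off.2)
    if P.contains q then (d.modify r 0 (· + 1)).modify q 0 (· + 1) else d) d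

def is_thin_path_alt (points : List (Int × Int)) : Bool :=
  let P := PySem.Set.ofList points
  let deg0 : PySem.Dict (Int × Int) Int := P.foldl (fun d p => d.insert p 0) PySem.Dict.empty
  let deg := P.foldl (pvDegPass P) deg0
  let end_like := points.foldl (fun a p => a + (if deg.getD p 0 ≤ 2 then (1 : Int) else 0)) 0
  let branchy := points.foldl (fun a p => a + (if deg.getD p 0 ≥ 4 then (1 : Int) else 0)) 0
  -- int(0.05*len(points)) == len(points)//20 exactly for every list length below 2^53
  decide (branchy = 0) && decide (end_like ≥ max 2 ((points.length : Int) / 20))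

-- ===== PRECONDITION & SPEC =====
def Spec_is_thin_path (points : List (Int × Int)) (out : Bool) : Prop := out = is_thin_path_alt points
instance (points : List (Int × Int)) (out : Bool) : Decidable (Spec_is_thin_path points out) := by unfold Spec_is_thin_path; infer_instance

-- ===== CLAIM (what is proved, stated in full; the proofs are below) =====
def Claim_equal_is_thin_path : Prop := ∀ (points : List (Int × Int)), Dom_is_thin_path points → Spec_is_thin_path points (is_thin_path points)

-- ===== LEMMAS AND PROOFS =====

-- A's per-point degree: number of the 8 neighbours of p present in P
def pvDegOf (P : PySem.Set (Int × Int)) (p : Int × Int) : Int :=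
  pvN8.foldl (fun s off => s + (if P.contains (p.1 + off.1, p.2 + off.2) then (1 : Int) else 0)) 0

-- how much one (r, off) edge step adds to the stored degree of p
def pvContrib (P : PySem.Set (Int × Int)) (p r off : Int × Int) : Int :=
  (if (r.1 + off.1, r.2 + off.2) ∈ P ∧ r = p then 1 else 0) +
  (if (r.1 + off.1, r.2 + off.2) ∈ P ∧ (r.1 + off.1, r.2 + off.2) = p then 1 else 0)

theorem pv_getD_init0 (l : List (Int × Int)) (d : PySem.Dict (Int × Int) Int)
    (h : ∀ x, d.getD x 0 = 0) (x : Int × Int) :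
    (l.foldl (fun d p => d.insert p 0) d).getD x 0 = 0 := by
  induction l generalizing d with
  | nil => exact h x
  | cons r l ih =>
      refine ih _ (fun y => ?_)
      rw [PySem.Dict.getD_insert]
      split <;> simp [h]

set_option maxRecDepth 8000 in
theorem pv_step_one (P : PySem.Set (Int × Int)) (d : PySem.Dict (Int × Int) Int) (r off p : Int × Int) :
    (if P.contains (r.1 + off.1, r.2 + off.2) then
        (d.modify r 0 (· + 1)).modify (r.1 + off.1, r.2 + off.2) 0 (· + 1) else d).getD p 0
      = d.getD p 0 + pvContrib P p r off := by
  unfold pvContrib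
  by_cases hg : (r.1 + off.1, r.2 + off.2) ∈ P
  · have hgb : P.contains (r.1 + off.1, r.2 + off.2) = true := by simp [hg]
    rw [if_pos hgb]
    simp only [PySem.Dict.getD_modify, hg, true_and]
    by_cases h2 : r = p
    · subst h2
      by_cases h1 : ((r.1 + off.1, r.2 + off.2) : Int × Int) = r
      · rw [if_pos h1.symm, if_pos h1, if_pos rfl, if_pos h1]; omega
      · rw [if_neg (fun h => h1 h.symm), if_pos rfl, if_pos rfl, if_neg h1]; omega
    · by_cases h1 : ((r.1 + off.1, r.2 + off.2) : Int × Int) = p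
      · rw [if_pos h1.symm, if_neg (fun h => h2 (h1 ▸ h).symm), if_neg h2, if_pos h1]
        rw [h1]; omega
      · rw [if_neg (fun h => h1 h.symm), if_neg (fun h => h2 h.symm), if_neg h2, if_neg h1]
        omega
  · rw [if_neg (by simp [hg])]
    simp [hg]

theorem pv_fold_offs (P : PySem.Set (Int × Int)) (p r : Int × Int) (offs : List (Int × Int)) :
    ∀ d : PySem.Dict (Int × Int) Int,
    (offs.foldl (fun d off =>
        let q := (r.1 + off.1, r.2 + off.2)
        if P.contains q then (d.modify r 0 (· + 1)).modify q 0 (· + 1) else d) d).getD p 0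
      = d.getD p 0 + (offs.map (pvContrib P p r)).sum := by
  induction offs with
  | nil => intro d; simp
  | cons o offs ih =>
      intro d
      simp only [List.foldl_cons, List.map_cons, List.sum_cons]
      rw [ih]
      have h := pv_step_one P d r o p
      simp only at h ⊢
      rw [h]; ring

theorem pv_degPass_getD (P : PySem.Set (Int × Int)) (p r : Int × Int) (d : PySem.Dict (Int × Int) Int) :
    (pvDegPass P d r).getD p 0 = d.getD p 0 + (pvPOS4.map (pvContrib P p r)).sum := by
  unfold pvDegPass
  exact pv_fold_offs P p r pvPOS4 d

theorem pv_outer (P : PySem.Set (Int × Int)) (p : Int × Int) (S : List (Int × Int)) :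
    ∀ d : PySem.Dict (Int × Int) Int,
    (S.foldl (pvDegPass P) d).getD p 0
      = d.getD p 0 + (S.map (fun r => (pvPOS4.map (pvContrib P p r)).sum)).sum := by
  induction S with
  | nil => intro d; simp
  | cons r S ih =>
      intro d
      simp only [List.foldl_cons, List.map_cons, List.sum_cons]
      rw [ih, pv_degPass_getD]; ring

theorem pv_sum_map_add {α : Type} (S : List α) (u v : α → Int) :
    (S.map (fun r => u r + v r)).sum = (S.map u).sum + (S.map v).sum := by
  induction S with
  | nil => simp
  | cons r S ih => simp [ih]; ring

theorem pv_sum_indicator {α : Type} [DecidableEq α] (p : α) (w : α → Int) :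
    ∀ S : List α, S.Nodup → p ∈ S →
      (S.map (fun r => if r = p then w r else 0)).sum = w p := by
  intro S
  induction S with
  | nil => intro _ h; cases h
  | cons r S ih =>
      intro hnd hm
      simp only [List.nodup_cons] at hnd
      simp only [List.map_cons, List.sum_cons]
      by_cases hrp : r = p
      · subst hrp
        have hzero : (S.map (fun r' => if r' = r then w r' else 0)).sum = 0 := by
          rw [List.sum_eq_zero]
          intro x hx
          simp only [List.mem_map] at hx
          obtain ⟨y, hy, hxy⟩ := hx
          have hyr : ¬ y = r := fun hh => hnd.1 (hh ▸ hy)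
          rw [if_neg hyr] at hxy; omega
        simp [hzero]
      · have hp : p ∈ S := by
          rcases List.mem_cons.mp hm with h | h
          · exact absurd h.symm hrp
          · exact h
        simp [hrp, ih hnd.2 hp]

theorem pv_sum_indicator' {α : Type} [DecidableEq α] (x : α) :
    ∀ S : List α, S.Nodup →
      (S.map (fun r => if r = x then (1 : Int) else 0)).sum = if x ∈ S then 1 else 0 := by
  intro S
  induction S with
  | nil => simp
  | cons r S ih =>
      intro hnd
      simp only [List.nodup_cons] at hnd
      by_cases hrx : r = x
      · subst hrx
        simp [ih hnd.2, hnd.1]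
      · simp [hrx, ih hnd.2, List.mem_cons, Ne.symm hrx]

-- pointwise rewrite of the "own turn" indicator
theorem pv_pointwise_t (P : PySem.Set (Int × Int)) (p : Int × Int) (a b : Int) (r : Int × Int) :
    (if (r.1 + a, r.2 + b) ∈ P ∧ r = p then (1 : Int) else 0)
      = if r = p then (if (p.1 + a, p.2 + b) ∈ P then (1 : Int) else 0) else 0 := by
  by_cases h : r = p
  · subst h; simp
  · simp [h]

-- pointwise rewrite of the "neighbour's turn" indicator (needs p ∈ P)
theorem pv_pointwise_s (P : PySem.Set (Int × Int)) (p : Int × Int) (a b : Int) (hp : p ∈ P)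
    (r : Int × Int) :
    (if (r.1 + a, r.2 + b) ∈ P ∧ (r.1 + a, r.2 + b) = p then (1 : Int) else 0)
      = if r = (p.1 - a, p.2 - b) then 1 else 0 := by
  by_cases h : r = (p.1 - a, p.2 - b)
  · subst h
    have he : ((p.1 - a, p.2 - b) : Int × Int).1 + a = p.1 := by ring
    have he2 : ((p.1 - a, p.2 - b) : Int × Int).2 + b = p.2 := by ring
    simp only [he, he2, Prod.mk.eta]
    simp [hp]
  · rw [if_neg h, if_neg]
    rintro ⟨-, he⟩
    apply h
    have h1 := congrArg Prod.fst he
    have h2 := congrArg Prod.snd he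
    simp only at h1 h2
    have : r = (r.1, r.2) := rfl
    rw [this]
    simp only [Prod.mk.injEq]
    omega

-- value of the degree dict after the edge pass = A's 8-neighbour count, for p in the set
set_option maxHeartbeats 2000000 in
theorem pv_deg_eq (points : List (Int × Int)) (p : Int × Int)
    (hp : p ∈ PySem.Set.ofList points) :
    (((PySem.Set.ofList points).foldl (pvDegPass (PySem.Set.ofList points))
        ((PySem.Set.ofList points).foldl (fun d q => d.insert q 0) PySem.Dict.empty)).getD p 0)
      = pvDegOf (PySem.Set.ofList points) p := by
  have hnd : (PySem.Set.ofList points).Nodup := PySem.Set.nodup_ofList points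
  set P := PySem.Set.ofList points with hP
  rw [pv_outer, pv_getD_init0 _ _ (fun x => PySem.Dict.getD_empty _ _), zero_add]
  have hexp : ∀ r : Int × Int, (pvPOS4.map (pvContrib P p r)).sum
      = ((if (r.1 + -1, r.2 + 0) ∈ P ∧ r = p then (1:Int) else 0) + (if (r.1 + -1, r.2 + 0) ∈ P ∧ (r.1 + -1, r.2 + 0) = p then (1:Int) else 0))
      + (((if (r.1 + -1, r.2 + 1) ∈ P ∧ r = p then (1:Int) else 0) + (if (r.1 + -1, r.2 + 1) ∈ P ∧ (r.1 + -1, r.2 + 1) = p then (1:Int) else 0))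
      + (((if (r.1 + 0, r.2 + 1) ∈ P ∧ r = p then (1:Int) else 0) + (if (r.1 + 0, r.2 + 1) ∈ P ∧ (r.1 + 0, r.2 + 1) = p then (1:Int) else 0))
      + ((if (r.1 + 1, r.2 + 1) ∈ P ∧ r = p then (1:Int) else 0) + (if (r.1 + 1, r.2 + 1) ∈ P ∧ (r.1 + 1, r.2 + 1) = p then (1:Int) else 0)))) := by
    intro r
    simp [pvPOS4, pvContrib]
  simp only [hexp]
  rw [pv_sum_map_add, pv_sum_map_add, pv_sum_map_add,
      pv_sum_map_add, pv_sum_map_add, pv_sum_map_add, pv_sum_map_add]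
  simp only [pv_pointwise_t P p, pv_pointwise_s P p _ _ hp]
  rw [pv_sum_indicator p _ P hnd hp, pv_sum_indicator p _ P hnd hp,
      pv_sum_indicator p _ P hnd hp, pv_sum_indicator p _ P hnd hp,
      pv_sum_indicator' _ P hnd, pv_sum_indicator' _ P hnd,
      pv_sum_indicator' _ P hnd, pv_sum_indicator' _ P hnd]
  simp only [pvDegOf, pvN8, List.foldl_cons, List.foldl_nil]
  norm_num
  ring_nf

-- fold over a list with ++ [f x] builds the map
theorem pv_degs_map (points : List (Int × Int)) (P : PySem.Set (Int × Int)) :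
    points.foldl (fun degs p =>
      degs ++ [pvN8.foldl (fun s off => s + (if P.contains (p.1 + off.1, p.2 + off.2) then (1 : Int) else 0)) 0]) []
    = points.map (pvDegOf P) := by
  simpa [pvDegOf] using
    (PySem.List.foldl_append_singleton_eq_map (l := points) (f := pvDegOf P) (acc := []))

-- ===== VERDICT (by name: the statement is the Claim_ definition above) =====
theorem is_thin_path_spec : Claim_equal_is_thin_path := by
  intro points _
  unfold Spec_is_thin_path is_thin_path is_thin_path_alt
  simp only
  rw [pv_degs_map, List.foldl_map, List.foldl_map]
  have key : ∀ x ∈ points,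
      (((PySem.Set.ofList points).foldl (pvDegPass (PySem.Set.ofList points))
          ((PySem.Set.ofList points).foldl (fun d q => d.insert q 0) PySem.Dict.empty)).getD x 0)
        = pvDegOf (PySem.Set.ofList points) x := fun x hx =>
    pv_deg_eq points x (by rw [PySem.Set.mem_ofList]; exact hx)
  have h1 := PySem.List.foldl_congr_mem (l := points)
      (f := fun (a : Int) p => a + (if pvDegOf (PySem.Set.ofList points) p ≤ 2 then (1:Int) else 0))
      (g := fun (a : Int) p => a + (if (((PySem.Set.ofList points).foldl (pvDegPass (PySem.Set.ofList points)) ((PySem.Set.ofList points).foldl (fun d q => d.insert q 0) PySem.Dict.empty)).getD p 0) ≤ 2 then (1:Int) else 0))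
      (init := 0) (fun acc x hx => by beta_reduce; rw [key x hx])
  have h2 := PySem.List.foldl_congr_mem (l := points)
      (f := fun (a : Int) p => a + (if pvDegOf (PySem.Set.ofList points) p ≥ 4 then (1:Int) else 0))
      (g := fun (a : Int) p => a + (if (((PySem.Set.ofList points).foldl (pvDegPass (PySem.Set.ofList points)) ((PySem.Set.ofList points).foldl (fun d q => d.insert q 0) PySem.Dict.empty)).getD p 0) ≥ 4 then (1:Int) else 0))
      (init := 0) (fun acc x hx => by beta_reduce; rw [key x hx])
  rw [h1, h2]
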